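-- pv_equiv track=rewrite | github.com/Joshua-Ean-Valera/AC-SAMPLE-VALERA | streamlit_app.py | print_mod_expo
-- ===== SOURCE A (Python) =====
-- def primitive_root(g, n):
--     req_set = {num for num in range(1, n)}
--     gen_set = {pow(g, power, n) for power in range(1, n)}
--     return req_set == gen_set
--
-- def find_primitive_roots(n):
--     pri_roots = []
--     for g in range(1, n):
--         if primitive_root(g, n):
--             pri_roots.append(g)
--     return pri_roots
--
-- def print_mod_expo(n):
--     pri_roots = find_primitive_roots(n)
--     results = []
--     for g in range(1, n):
--         result_list = []
--         value = 1
--         for power in range(1, n):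
--             value = pow(g, power, n)
--             result_list.append(f"{g}^{power} mod {n} = {value}")
--             if value == 1 and power < n - 1:
--                 break
--         result_str = ", ".join(result_list)
--         if g in pri_roots:
--             results.append(f"{result_str} ==> {g} is primitive root of {n}")
--         else:
--             results.append(f"{result_str}")
--     return pri_roots, results
-- ===== SOURCE B (Python) =====
-- def print_mod_expo(n):
--     # One pass per base g: compute the residues g^1..g^(n-1) mod n once by
--     # iterated multiplication (no pow calls), then derive both the cycle
--     # string (prefix up to the first early return to 1) and primitivity
--     # (the residues cover all of 1..n-1) from that single list.
--     target = set(range(1, n))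
--     pri_roots = []
--     results = []
--     for g in range(1, n):
--         vals = []
--         acc = 1
--         for _ in range(1, n):
--             acc = acc * g % n
--             vals.append(acc)
--         parts = []
--         for power, value in enumerate(vals, 1):
--             parts.append(f"{g}^{power} mod {n} = {value}")
--             if value == 1 and power < n - 1:
--                 break
--         s = ", ".join(parts)
--         if set(vals) == target:
--             pri_roots.append(g)
--             results.append(f"{s} ==> {g} is primitive root of {n}")
--         else:
--             results.append(s)
--     return pri_roots, results
-- ===== Notes on version B (the rewrite author's own statement) =====
-- stated objective: faster
-- what changed: B makes one pass per base g: it builds the residue list g^1..g^(n-1) mod n by iterated multiplication (no pow calls) and derives both the cycle string (break prefix over that list) and primitivity (residue set equals {1..n-1}) from it, eliminating A's separate find_primitive_roots double loop, its per-power pow recomputation and the per-base scan of the pri_roots list.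
import Mathlib
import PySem

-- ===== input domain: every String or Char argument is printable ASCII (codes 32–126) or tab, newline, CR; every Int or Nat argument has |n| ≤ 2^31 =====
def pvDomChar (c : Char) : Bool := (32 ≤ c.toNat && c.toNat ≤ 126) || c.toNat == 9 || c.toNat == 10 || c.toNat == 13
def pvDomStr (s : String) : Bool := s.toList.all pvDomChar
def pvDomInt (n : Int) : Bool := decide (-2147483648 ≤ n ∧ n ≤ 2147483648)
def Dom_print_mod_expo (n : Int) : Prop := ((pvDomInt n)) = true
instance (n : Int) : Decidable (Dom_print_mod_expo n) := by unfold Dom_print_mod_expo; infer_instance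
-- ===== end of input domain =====

-- B replaces A's separate primitive-root double loop and repeated pow calls by one pass
-- per base that builds the residue list by iterated multiplication and derives both the
-- cycle string and primitivity from it (objective: faster by a constant factor).

-- f"{g}^{power} mod {n} = {value}"  (identical f-string in both Pythons)
def pvFmt (g p n v : Int) : String :=
  PySem.Int.toStr g ++ "^" ++ PySem.Int.toStr p ++ " mod " ++ PySem.Int.toStr n ++ " = " ++ PySem.Int.toStr v

-- " ==> {g} is primitive root of {n}"  (identical f-string suffix in both Pythons)
def pvSuffix (g n : Int) : String :=
  " ==> " ++ PySem.Int.toStr g ++ " is primitive root of " ++ PySem.Int.toStr n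

-- ===== PORT A =====
-- pow(g, p, n); exact here: every call has p ≥ 1 (from range(1, n)) and n ≥ 2
def pyPow3 (g p n : Int) : Int := PySem.Int.powMod g p.toNat n

def primitive_root (g n : Int) : Bool :=
  let req_set : PySem.Set Int := PySem.Set.ofList (PySem.List.pyRange 1 n 1)
  let gen_set : PySem.Set Int :=
    PySem.Set.ofList ((PySem.List.pyRange 1 n 1).map (fun power => pyPow3 g power n))
  PySem.Set.equal req_set gen_set

def find_primitive_roots (n : Int) : List Int :=
  (PySem.List.pyRange 1 n 1).foldl
    (fun pri_roots g => if primitive_root g n then pri_roots ++ [g] else pri_roots) []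

-- the inner 'for power in range(1, n)' with its early break ('value = 1' before the loop is dead)
def aLoop (g n : Int) : List Int → List String → List String
  | [], result_list => result_list
  | p :: ps, result_list =>
    let value := pyPow3 g p n
    let result_list' := result_list ++ [pvFmt g p n value]
    if value = 1 ∧ p < n - 1 then result_list' else aLoop g n ps result_list'

def print_mod_expo (n : Int) : List Int × List String :=
  let pri_roots := find_primitive_roots n
  let results := (PySem.List.pyRange 1 n 1).foldl
    (fun results g =>
      let result_str := PySem.Str.join ", " (aLoop g n (PySem.List.pyRange 1 n 1) [])
      if pri_roots.contains g then results ++ [result_str ++ pvSuffix g n]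
      else results ++ [result_str]) []
  (pri_roots, results)

-- ===== PORT B =====
-- vals: successive residues acc = acc * g % n for the n-1 iterations
def bPowers (g n : Int) : List Int :=
  ((PySem.List.pyRange 1 n 1).foldl
    (fun (st : Int × List Int) _ =>
      let acc := PySem.Int.mod (st.1 * g) n
      (acc, st.2 ++ [acc])) (1, [])).2

-- 'for power, value in enumerate(vals, 1)' with the early break
def bParts (g n : Int) : List (Int × Int) → List String → List String
  | [], parts => parts
  | (power, value) :: rest, parts =>
    let parts' := parts ++ [pvFmt g power n value]
    if value = 1 ∧ power < n - 1 then parts' else bParts g n rest parts'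

def print_mod_expo_alt (n : Int) : List Int × List String :=
  let target : PySem.Set Int := PySem.Set.ofList (PySem.List.pyRange 1 n 1)
  (PySem.List.pyRange 1 n 1).foldl
    (fun (st : List Int × List String) g =>
      let vals := bPowers g n
      let s := PySem.Str.join ", " (bParts g n (PySem.List.enumerate vals 1) [])
      if PySem.Set.equal (PySem.Set.ofList vals) target then
        (st.1 ++ [g], st.2 ++ [s ++ pvSuffix g n])
      else (st.1, st.2 ++ [s])) ([], [])

-- ===== PRECONDITION & SPEC =====
def Spec_print_mod_expo (n : Int) (out : List Int × List String) : Prop := out = print_mod_expo_alt n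
instance (n : Int) (out : List Int × List String) : Decidable (Spec_print_mod_expo n out) := by unfold Spec_print_mod_expo; infer_instance

-- ===== CLAIM (what is proved, stated in full; the proofs are below) =====
def Claim_equal_print_mod_expo : Prop := ∀ (n : Int), Dom_print_mod_expo n → Spec_print_mod_expo n (print_mod_expo n)


-- ===== LEMMAS AND PROOFS =====

-- the residue-accumulating fold, characterised (invariant: acc ≡ g^e mod n)
theorem powFold (g n : Int) (hn : 0 < n) :
    ∀ (l : List Int) (acc : Int) (e : Nat) (vs : List Int),
      acc % n = g ^ e % n →
      (l.foldl (fun (st : Int × List Int) _ =>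
          let a := PySem.Int.mod (st.1 * g) n
          (a, st.2 ++ [a])) (acc, vs)).2
        = vs ++ (List.range l.length).map (fun k => PySem.Int.mod (g ^ (e + 1 + k)) n) := by
  intro l
  induction l with
  | nil => intro acc e vs h; simp
  | cons x xs ih =>
    intro acc e vs h
    have hstep : PySem.Int.mod (acc * g) n = PySem.Int.mod (g ^ (e + 1)) n := by
      rw [PySem.Int.mod_eq_emod_of_pos hn, PySem.Int.mod_eq_emod_of_pos hn]
      calc (acc * g) % n = (acc % n * (g % n)) % n := by rw [Int.mul_emod]
        _ = (g ^ e % n * (g % n)) % n := by rw [h]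
        _ = (g ^ e * g) % n := by rw [← Int.mul_emod]
        _ = g ^ (e + 1) % n := by rw [pow_succ]
    have hinv : PySem.Int.mod (acc * g) n % n = g ^ (e + 1) % n := by
      rw [hstep, PySem.Int.mod_eq_emod_of_pos hn, Int.emod_emod_of_dvd _ dvd_rfl]
    simp only [List.foldl_cons]
    rw [ih (PySem.Int.mod (acc * g) n) (e + 1) (vs ++ [PySem.Int.mod (acc * g) n]) hinv]
    rw [hstep, List.length_cons, List.range_succ_eq_map, List.map_cons, List.map_map]
    have hm : ((fun k => PySem.Int.mod (g ^ (e + 1 + k)) n) ∘ Nat.succ)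
        = fun k => PySem.Int.mod (g ^ (e + 1 + 1 + k)) n := by
      funext k
      have hx : e + 1 + (k + 1) = e + 1 + 1 + k := by omega
      simp only [Function.comp_apply, Nat.succ_eq_add_one, hx]
    rw [hm]
    simp

-- iterated multiplication produces exactly the pow(g, p, n) residues
theorem bPowers_eq (g n : Int) (hn : 0 < n) :
    bPowers g n = (PySem.List.pyRange 1 n 1).map (fun p => pyPow3 g p n) := by
  unfold bPowers
  rw [powFold g n hn (PySem.List.pyRange 1 n 1) 1 0 [] (by simp)]
  rw [PySem.List.pyRange_one]
  simp only [List.nil_append, List.length_map, List.length_range, List.map_map]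
  apply List.map_congr_left
  intro k hk
  simp only [Function.comp_apply]
  unfold pyPow3
  rw [PySem.Int.powMod_eq]
  have ht : ((1 : Int) + (k : Int)).toNat = 0 + 1 + k := by omega
  rw [ht]

-- the two break loops agree when the (power, value) pairs match A's recomputation
theorem bParts_eq_aLoop (g n : Int) :
    ∀ (l : List Int) (acc : List String),
      bParts g n (l.map (fun p => (p, pyPow3 g p n))) acc = aLoop g n l acc := by
  intro l
  induction l with
  | nil => intro acc; simp [bParts, aLoop]
  | cons x xs ih =>
    intro acc
    simp only [List.map_cons, bParts, aLoop]
    split_ifs with h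
    · rfl
    · exact ih _

theorem enumerate_powers (g n : Int) (hn : 0 < n) :
    PySem.List.enumerate (bPowers g n) 1
      = (PySem.List.pyRange 1 n 1).map (fun p => (p, pyPow3 g p n)) := by
  have hv := bPowers_eq g n hn
  apply List.ext_getElem
  · simp [hv, PySem.List.length_enumerate, PySem.List.length_pyRange_one]
  · intro k h1 h2
    rw [PySem.List.getElem_enumerate]
    simp only [hv, List.getElem_map, PySem.List.getElem_pyRange_one]

theorem prim_eq (g n : Int) (hn : 0 < n) :
    PySem.Set.equal (PySem.Set.ofList (bPowers g n))
        (PySem.Set.ofList (PySem.List.pyRange 1 n 1)) = primitive_root g n := by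
  unfold primitive_root
  rw [bPowers_eq g n hn, Bool.eq_iff_iff]
  simp only [PySem.Set.equal_iff]
  constructor <;> intro h x <;> exact (h x).symm

-- per-base string entries, for the outer folds
def entryA (n g : Int) : String := PySem.Str.join ", " (aLoop g n (PySem.List.pyRange 1 n 1) [])

def entryB (n g : Int) : String :=
  PySem.Str.join ", " (bParts g n (PySem.List.enumerate (bPowers g n) 1) [])

def Qb (n g : Int) : Bool :=
  PySem.Set.equal (PySem.Set.ofList (bPowers g n)) (PySem.Set.ofList (PySem.List.pyRange 1 n 1))

theorem entry_eq (n g : Int) (hn : 0 < n) : entryB n g = entryA n g := by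
  unfold entryA entryB
  rw [enumerate_powers g n hn, bParts_eq_aLoop]

-- A's outer results fold, characterised
theorem aResults_fold (n : Int) (pri : List Int) :
    ∀ (l : List Int) (acc : List String),
      l.foldl (fun results g =>
          if pri.contains g then
            results ++ [PySem.Str.join ", " (aLoop g n (PySem.List.pyRange 1 n 1) []) ++ pvSuffix g n]
          else results ++ [PySem.Str.join ", " (aLoop g n (PySem.List.pyRange 1 n 1) [])]) acc
        = acc ++ l.map (fun g =>
            if pri.contains g then entryA n g ++ pvSuffix g n else entryA n g) := by
  intro l
  induction l with
  | nil => intro acc; simp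
  | cons x xs ih =>
    intro acc
    simp only [List.foldl_cons, List.map_cons]
    rw [ih]
    split_ifs with h <;> simp [entryA]

-- B's outer fold, characterised
theorem bFold (n : Int) :
    ∀ (l : List Int) (accP : List Int) (accS : List String),
      l.foldl (fun (st : List Int × List String) g =>
          let vals := bPowers g n
          let s := PySem.Str.join ", " (bParts g n (PySem.List.enumerate vals 1) [])
          if PySem.Set.equal (PySem.Set.ofList vals) (PySem.Set.ofList (PySem.List.pyRange 1 n 1)) then
            (st.1 ++ [g], st.2 ++ [s ++ pvSuffix g n])
          else (st.1, st.2 ++ [s])) (accP, accS)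
        = (accP ++ l.filter (Qb n),
           accS ++ l.map (fun g => if Qb n g then entryB n g ++ pvSuffix g n else entryB n g)) := by
  intro l
  induction l with
  | nil => intro accP accS; simp
  | cons x xs ih =>
    intro accP accS
    simp only [List.foldl_cons, List.map_cons, List.filter_cons]
    by_cases h : Qb n x
    · simp only [h, if_true]
      rw [show (PySem.Set.equal (PySem.Set.ofList (bPowers x n)) (PySem.Set.ofList (PySem.List.pyRange 1 n 1))) = Qb n x from rfl, h]
      simp only [if_true]
      rw [ih]
      simp [entryB]
    · rw [show (PySem.Set.equal (PySem.Set.ofList (bPowers x n)) (PySem.Set.ofList (PySem.List.pyRange 1 n 1))) = Qb n x from rfl, Bool.not_eq_true] at *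
      simp only [h]
      rw [ih]
      simp [entryB]

-- ===== VERDICT (by name: the statement is the Claim_ definition above) =====
theorem print_mod_expo_spec : Claim_equal_print_mod_expo := by
  intro n _
  unfold Spec_print_mod_expo
  by_cases hle : n ≤ 1
  · have h : PySem.List.pyRange 1 n 1 = [] := PySem.List.pyRange_one_eq_nil hle
    simp [print_mod_expo, print_mod_expo_alt, find_primitive_roots, h]
  · have hn : 0 < n := by omega
    unfold print_mod_expo print_mod_expo_alt find_primitive_roots
    rw [PySem.List.foldl_append_if (fun g => primitive_root g n) (fun g => g) (PySem.List.pyRange 1 n 1) []]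
    rw [bFold n (PySem.List.pyRange 1 n 1) [] []]
    have hQ : ∀ g, Qb n g = primitive_root g n := fun g => prim_eq g n hn
    simp only [List.nil_append, List.map_id']
    rw [aResults_fold n (List.filter (fun g => primitive_root g n) (PySem.List.pyRange 1 n 1))
        (PySem.List.pyRange 1 n 1) []]
    simp only [List.nil_append]
    rw [Prod.mk.injEq]
    constructor
    · exact List.filter_congr (fun a _ => (hQ a).symm)
    · apply List.map_congr_left
      intro g hg
      have hc : (List.filter (fun g => primitive_root g n) (PySem.List.pyRange 1 n 1)).contains g
          = primitive_root g n := by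
        rw [Bool.eq_iff_iff, List.contains_iff_mem, List.mem_filter]
        simp [hg]
      rw [hc, hQ g, entry_eq n g hn]
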